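-- pv_equiv track=rewrite | github.com/morishuz/frame-extractor | pipeline.py | _processing_size
-- ===== SOURCE A (Python) =====
-- def _processing_size(width: int, height: int, n_downsample: int) -> tuple[int, int]:
--     out_w, out_h = width, height
--     for _ in range(max(0, int(n_downsample))):
--         if out_w <= 1 or out_h <= 1:
--             break
--         out_w = max(1, out_w // 2)
--         out_h = max(1, out_h // 2)
--     return (out_w, out_h)
-- ===== SOURCE B (Python) =====
-- def _processing_size(width: int, height: int, n_downsample: int) -> tuple[int, int]:
--     # Closed form: k = number of halvings the loop would perform, then shift once.
--     n = max(0, int(n_downsample))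
--     if width <= 1 or height <= 1:
--         return (width, height)
--     k = min(n, width.bit_length() - 1, height.bit_length() - 1)
--     return (width >> k, height >> k)
-- ===== Notes on version B (the rewrite author's own statement) =====
-- stated objective: faster
-- what changed: Replaces the per-iteration halving loop with a closed form: k = min(n, bit_length(width)-1, bit_length(height)-1) halvings, done as a single right shift.
import Mathlib
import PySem

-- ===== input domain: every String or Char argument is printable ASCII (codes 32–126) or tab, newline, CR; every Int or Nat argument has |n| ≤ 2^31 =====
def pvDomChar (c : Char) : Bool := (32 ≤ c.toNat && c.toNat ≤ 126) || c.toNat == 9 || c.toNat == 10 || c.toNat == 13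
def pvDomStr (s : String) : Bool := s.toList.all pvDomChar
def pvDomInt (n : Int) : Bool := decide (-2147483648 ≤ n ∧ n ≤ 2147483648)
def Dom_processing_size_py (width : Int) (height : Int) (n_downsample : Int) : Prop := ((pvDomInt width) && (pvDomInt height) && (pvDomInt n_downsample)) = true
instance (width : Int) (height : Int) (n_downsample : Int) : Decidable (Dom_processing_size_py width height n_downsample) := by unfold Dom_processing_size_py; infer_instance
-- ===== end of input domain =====

-- B replaces A's halving loop with a closed-form shift count (asymptotically faster); same return value.

-- ===== PORT A =====
-- the 'for _ in range(...)' loop with its break, as structural recursion on the remaining iteration count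
def pvLoopA : Nat → Int → Int → Int × Int
  | 0, w, h => (w, h)
  | m+1, w, h =>
    if w ≤ 1 ∨ h ≤ 1 then (w, h)
    else pvLoopA m (max 1 (PySem.Int.floordiv w 2)) (max 1 (PySem.Int.floordiv h 2))

def processing_size_py (width : Int) (height : Int) (n_downsample : Int) : Int × Int :=
  pvLoopA (max 0 n_downsample).toNat width height

-- ===== PORT B =====
-- transliteration of Source B; Python's 'x >> k' is Lean's 'x >>> k' (k here is ≥ 0, so k.toNat is exact)
def processing_size_py_alt (width : Int) (height : Int) (n_downsample : Int) : Int × Int :=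
  let n : Int := max 0 n_downsample
  if width ≤ 1 ∨ height ≤ 1 then (width, height)
  else
    let k : Int := min (min n ((PySem.Int.bitLength width : Int) - 1)) ((PySem.Int.bitLength height : Int) - 1)
    (width >>> k.toNat, height >>> k.toNat)

-- ===== PRECONDITION & SPEC =====
def Spec_processing_size_py (width : Int) (height : Int) (n_downsample : Int) (out : Int × Int) : Prop := out = processing_size_py_alt width height n_downsample
instance (width : Int) (height : Int) (n_downsample : Int) (out : Int × Int) : Decidable (Spec_processing_size_py width height n_downsample out) := by unfold Spec_processing_size_py; infer_instance

-- ===== CLAIM (what is proved, stated in full; the proofs are below) =====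
def Claim_equal_processing_size_py : Prop := ∀ (width : Int) (height : Int) (n_downsample : Int), Dom_processing_size_py width height n_downsample → Spec_processing_size_py width height n_downsample (processing_size_py width height n_downsample)

-- ===== LEMMAS AND PROOFS =====

theorem pvLoop_stop (m : Nat) (w h : Int) (hwh : w ≤ 1 ∨ h ≤ 1) : pvLoopA m w h = (w, h) := by
  cases m with
  | zero => rfl
  | succ m => simp [pvLoopA, hwh]

theorem pvHalf_eq (w : Int) (hw : 1 < w) : w >>> (1:Nat) = PySem.Int.floordiv w 2 := by
  rw [PySem.Int.floordiv_eq_ediv_of_pos (by omega), Int.shiftRight_eq_div_pow]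
  norm_num

theorem pvShift_shift (w : Int) (a b : Nat) : (w >>> a) >>> b = w >>> (a + b) := by
  simp only [Int.shiftRight_eq_div_pow]
  push_cast
  rw [pow_add, Int.ediv_ediv_of_nonneg]
  positivity

theorem pvFloordiv_two_bounds (w : Int) (hw : 1 < w) :
    1 ≤ PySem.Int.floordiv w 2 ∧ 2 * PySem.Int.floordiv w 2 ≤ w ∧ w ≤ 2 * PySem.Int.floordiv w 2 + 1 := by
  rw [PySem.Int.floordiv_eq_ediv_of_pos (by omega)]
  omega

theorem pvBL_pos (w : Int) (hw : 0 < w) : 1 ≤ PySem.Int.bitLength w := by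
  have h := PySem.Int.bitLength_of_pos (show (0:Int) < w by omega)
  omega

theorem pvBL_two (w : Int) (hw : 1 < w) : 2 ≤ PySem.Int.bitLength w := by
  have h := PySem.Int.bitLength_of_pos (show (0:Int) < w by omega)
  have hd := pvFloordiv_two_bounds w hw
  have := pvBL_pos (PySem.Int.floordiv w 2) (by omega)
  omega

theorem pvBL_three (w : Int) (hw : 4 ≤ w) : 3 ≤ PySem.Int.bitLength w := by
  have h := PySem.Int.bitLength_of_pos (show (0:Int) < w by omega)
  have hd := pvFloordiv_two_bounds w (by omega)
  have := pvBL_two (PySem.Int.floordiv w 2) (by omega)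
  omega

theorem pvBL_half (w : Int) (hw : 1 < w) :
    PySem.Int.bitLength (PySem.Int.floordiv w 2) = PySem.Int.bitLength w - 1 := by
  have h := PySem.Int.bitLength_of_pos (show (0:Int) < w by omega)
  omega

theorem pvBL_small (w : Int) (hw : 1 < w) (hw4 : w < 4) : PySem.Int.bitLength w = 2 := by
  have h := PySem.Int.bitLength_of_pos (show (0:Int) < w by omega)
  have h2 : PySem.Int.floordiv w 2 = 1 := by
    rw [PySem.Int.floordiv_eq_ediv_of_pos (by omega)]; omega
  rw [h2] at h
  simpa [show PySem.Int.bitLength 1 = 1 from by decide] using h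

-- the loop, in closed form, on inputs where it actually halves
theorem pvLoop_closed : ∀ (m : Nat) (w h : Int), 1 < w → 1 < h →
    pvLoopA m w h =
      (w >>> min m (min (PySem.Int.bitLength w - 1) (PySem.Int.bitLength h - 1)),
       h >>> min m (min (PySem.Int.bitLength w - 1) (PySem.Int.bitLength h - 1))) := by
  intro m
  induction m with
  | zero => intro w h _ _; simp [pvLoopA]
  | succ m ih =>
    intro w h hw hh
    have hbw := pvBL_two w hw
    have hbh := pvBL_two h hh
    have hdw := pvFloordiv_two_bounds w hw
    have hdh := pvFloordiv_two_bounds h hh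
    have hcond : ¬ (w ≤ 1 ∨ h ≤ 1) := by omega
    rw [show pvLoopA (m+1) w h
        = pvLoopA m (PySem.Int.floordiv w 2) (PySem.Int.floordiv h 2) from by
      simp only [pvLoopA, if_neg hcond, max_eq_right hdw.1, max_eq_right hdh.1]]
    by_cases hsmall : w < 4 ∨ h < 4
    · -- after one halving some dimension reaches 1: the loop stops
      have hk : min (m+1) (min (PySem.Int.bitLength w - 1) (PySem.Int.bitLength h - 1)) = 1 := by
        rcases hsmall with hs | hs
        · rw [pvBL_small w hw hs]; omega
        · rw [pvBL_small h hh hs]; omega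
      rw [hk, pvHalf_eq w hw, pvHalf_eq h hh]
      apply pvLoop_stop
      rcases hsmall with hs | hs
      · left; omega
      · right; omega
    · push_neg at hsmall
      obtain ⟨hw4, hh4⟩ := hsmall
      rw [ih _ _ (by omega) (by omega), pvBL_half w hw, pvBL_half h hh,
          ← pvHalf_eq w hw, ← pvHalf_eq h hh, pvShift_shift, pvShift_shift]
      have hbw3 := pvBL_three w hw4
      have hbh3 := pvBL_three h hh4
      congr 2 <;> omega

-- ===== VERDICT (by name: the statement is the Claim_ definition above) =====
theorem processing_size_py_spec : Claim_equal_processing_size_py := by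
  intro width height n_downsample _
  unfold Spec_processing_size_py processing_size_py processing_size_py_alt
  by_cases hwh : width ≤ 1 ∨ height ≤ 1
  · rw [pvLoop_stop _ _ _ hwh]
    simp [hwh]
  · push_neg at hwh
    obtain ⟨hw, hh⟩ := hwh
    rw [pvLoop_closed _ _ _ hw hh]
    have hbw := pvBL_two width hw
    have hbh := pvBL_two height hh
    simp only [if_neg (by omega : ¬ (width ≤ 1 ∨ height ≤ 1))]
    congr 2 <;> omega
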